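-- pv_equiv track=rewrite | github.com/martinmateos2001/Guias-de-ejercicios-de-AyED-1-main | Finales/Final 18-07-2024/Final 18-07.py | fila_o_columna_valida
-- ===== SOURCE A (Python) =====
-- def esRepetido(lista:'list[int]', n:int):
--     apariciones:int = 0
--     for e in lista:
--         if n == e:
--             apariciones += 1
--     if apariciones > 1:
--         return True
--     else:
--         return False
--
-- def fila_o_columna_valida(lista:'list[int]') -> bool:
--     res:bool = False
--     numeros:'list[int]' = []
--     for i in range(1,10):
--         numeros.append(i)
--
--     for num in numeros:
--         if esRepetido(lista, num):
--             return res
--     res = True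
--     return res
-- ===== SOURCE B (Python) =====
-- def fila_o_columna_valida(lista: 'list[int]') -> bool:
--     seen = set()
--     for e in lista:
--         if 1 <= e <= 9:
--             if e in seen:
--                 return False
--             seen.add(e)
--     return True
-- ===== Notes on version B (the rewrite author's own statement) =====
-- stated objective: simpler
-- what changed: Replaces the nine full rescans of the list (one count pass per digit 1..9) with a single pass over the list maintaining a 'seen' set of in-range values, returning False on the first repeated digit.
import Mathlib
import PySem

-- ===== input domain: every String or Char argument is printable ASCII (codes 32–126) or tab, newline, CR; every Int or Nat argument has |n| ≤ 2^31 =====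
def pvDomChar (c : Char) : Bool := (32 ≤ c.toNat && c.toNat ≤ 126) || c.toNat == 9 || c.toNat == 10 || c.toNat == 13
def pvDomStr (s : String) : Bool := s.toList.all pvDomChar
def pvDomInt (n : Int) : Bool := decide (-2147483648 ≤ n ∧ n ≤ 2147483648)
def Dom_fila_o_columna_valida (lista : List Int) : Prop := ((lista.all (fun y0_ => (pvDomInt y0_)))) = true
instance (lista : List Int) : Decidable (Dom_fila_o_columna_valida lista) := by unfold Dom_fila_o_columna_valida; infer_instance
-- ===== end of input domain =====

-- B replaces A's nine full rescans of the list (one count pass per digit 1..9)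
-- by a single pass maintaining a 'seen' set of in-range values (objective: simpler).

-- ===== PORT A =====
def esRepetido (lista : List Int) (n : Int) : Bool :=
  let apariciones : Int := lista.foldl (fun acc e => if n == e then acc + 1 else acc) 0
  if apariciones > 1 then true else false

def filaLoop (lista : List Int) : List Int → Bool
  | [] => true
  | num :: rest => if esRepetido lista num then false else filaLoop lista rest

def fila_o_columna_valida (lista : List Int) : Bool :=
  let numeros : List Int := (PySem.List.pyRange 1 10 1).foldl (fun acc i => acc ++ [i]) []
  filaLoop lista numeros

-- ===== PORT B =====
def altGo : PySem.Set Int → List Int → Bool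
  | _, [] => true
  | seen, e :: rest =>
    if 1 ≤ e ∧ e ≤ 9 then
      if PySem.Set.contains seen e then false
      else altGo (PySem.Set.add seen e) rest
    else altGo seen rest

def fila_o_columna_valida_alt (lista : List Int) : Bool :=
  altGo PySem.Set.empty lista

-- ===== PRECONDITION & SPEC =====
def Spec_fila_o_columna_valida (lista : List Int) (out : Bool) : Prop := out = fila_o_columna_valida_alt lista
instance (lista : List Int) (out : Bool) : Decidable (Spec_fila_o_columna_valida lista out) := by unfold Spec_fila_o_columna_valida; infer_instance

-- ===== CLAIM (what is proved, stated in full; the proofs are below) =====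
def Claim_equal_fila_o_columna_valida : Prop := ∀ (lista : List Int), Dom_fila_o_columna_valida lista → Spec_fila_o_columna_valida lista (fila_o_columna_valida lista)

-- ===== LEMMAS AND PROOFS =====

theorem foldl_count (lista : List Int) (n : Int) : ∀ c : Int,
    lista.foldl (fun acc e => if n == e then acc + 1 else acc) c = c + lista.count n := by
  induction lista with
  | nil => intro c; simp
  | cons a rest ih =>
    intro c
    simp only [List.foldl_cons, List.count_cons, ih]
    by_cases h : n = a
    · simp [h]; ring
    · have h' : ¬ (a = n) := fun hh => h hh.symm
      simp [h, h']

theorem esRepetido_iff (lista : List Int) (n : Int) :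
    esRepetido lista n = true ↔ 1 < lista.count n := by
  simp only [esRepetido, foldl_count, Int.zero_add]
  split_ifs with h
  · simp only [true_iff]
    exact_mod_cast h
  · simp only [false_iff]
    exact fun hc => h (by exact_mod_cast hc)

theorem filaLoop_iff (lista : List Int) (nums : List Int) :
    filaLoop lista nums = true ↔ ∀ n ∈ nums, lista.count n ≤ 1 := by
  induction nums with
  | nil => simp [filaLoop]
  | cons a rest ih =>
    simp only [filaLoop]
    split_ifs with h
    · rw [esRepetido_iff] at h
      simp only [List.mem_cons]
      constructor
      · intro hh; cases hh
      · intro hall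
        exact absurd (hall a (Or.inl rfl)) (by omega)
    · rw [esRepetido_iff] at h
      rw [ih]
      constructor
      · intro hall n hn
        rcases List.mem_cons.mp hn with rfl | hn
        · omega
        · exact hall n hn
      · intro hall n hn; exact hall n (List.mem_cons_of_mem _ hn)

theorem A_iff (lista : List Int) :
    fila_o_columna_valida lista = true ↔ ∀ n : Int, 1 ≤ n → n ≤ 9 → lista.count n ≤ 1 := by
  have hnum : ((PySem.List.pyRange 1 10 1).foldl (fun acc i => acc ++ [i]) ([] : List Int))
      = [1, 2, 3, 4, 5, 6, 7, 8, 9] := by decide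
  simp only [fila_o_columna_valida, hnum, filaLoop_iff]
  constructor
  · intro h n h1 h9
    have hn : n ∈ ([1, 2, 3, 4, 5, 6, 7, 8, 9] : List Int) := by
      simp only [List.mem_cons, List.not_mem_nil, or_false]
      omega
    exact h n hn
  · intro h n hn
    have : 1 ≤ n ∧ n ≤ 9 := by
      simp only [List.mem_cons, List.not_mem_nil, or_false] at hn
      rcases hn with rfl | rfl | rfl | rfl | rfl | rfl | rfl | rfl | rfl <;> omega
    exact h n this.1 this.2

theorem altGo_iff (xs : List Int) : ∀ seen : PySem.Set Int,
    altGo seen xs = true ↔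
      ∀ e ∈ xs, 1 ≤ e → e ≤ 9 → (e ∉ seen ∧ xs.count e ≤ 1) := by
  induction xs with
  | nil => intro seen; simp [altGo]
  | cons a rest ih =>
    intro seen
    simp only [altGo]
    split_ifs with hr hs
    · -- a in range and already seen: loop returns false
      simp only [false_iff]
      intro h
      exact (h a (List.mem_cons_self) hr.1 hr.2).1 ((PySem.Set.contains_iff _ _).mp hs)
    · -- a in range, not seen yet
      rw [ih]
      have hseen : a ∉ seen := fun hm => hs ((PySem.Set.contains_iff _ _).mpr hm)
      constructor
      · intro h e he h1 h9
        rcases List.mem_cons.mp he with rfl | he'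
        · refine ⟨hseen, ?_⟩
          have hnr : e ∉ rest := by
            intro hmem
            exact (h e hmem h1 h9).1 ((PySem.Set.mem_add _ _ _).mpr (Or.inr rfl))
          have : rest.count e = 0 := List.count_eq_zero.mpr hnr
          simp [this]
        · obtain ⟨hna, hc⟩ := h e he' h1 h9
          have hne : e ≠ a := fun hh => hna ((PySem.Set.mem_add _ _ _).mpr (Or.inr hh))
          have hns : e ∉ seen := fun hh => hna ((PySem.Set.mem_add _ _ _).mpr (Or.inl hh))
          refine ⟨hns, ?_⟩
          simpa [List.count_cons, Ne.symm hne] using hc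
      · intro h e he h1 h9
        obtain ⟨hns, hc⟩ := h e (List.mem_cons_of_mem _ he) h1 h9
        have hne : e ≠ a := by
          rintro rfl
          have : 1 ≤ rest.count e := List.count_pos_iff.mpr he
          simp at hc
          omega
        refine ⟨?_, ?_⟩
        · intro hm
          rcases (PySem.Set.mem_add _ _ _).mp hm with hm | hm
          · exact hns hm
          · exact hne hm
        · simpa [List.count_cons, Ne.symm hne] using hc
    · -- a out of range: skipped
      rw [ih]
      constructor
      · intro h e he h1 h9
        rcases List.mem_cons.mp he with rfl | he'
        · exact absurd ⟨h1, h9⟩ hr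
        · obtain ⟨hns, hc⟩ := h e he' h1 h9
          have hne : e ≠ a := by rintro rfl; exact hr ⟨h1, h9⟩
          refine ⟨hns, ?_⟩
          simpa [List.count_cons, Ne.symm hne] using hc
      · intro h e he h1 h9
        obtain ⟨hns, hc⟩ := h e (List.mem_cons_of_mem _ he) h1 h9
        have hne : e ≠ a := by rintro rfl; exact hr ⟨h1, h9⟩
        refine ⟨hns, ?_⟩
        simpa [List.count_cons, Ne.symm hne] using hc

theorem B_iff (lista : List Int) :
    fila_o_columna_valida_alt lista = true ↔
      ∀ n : Int, 1 ≤ n → n ≤ 9 → lista.count n ≤ 1 := by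
  rw [fila_o_columna_valida_alt, altGo_iff]
  constructor
  · intro h n h1 h9
    by_cases hn : n ∈ lista
    · exact (h n hn h1 h9).2
    · simp [List.count_eq_zero.mpr hn]
  · intro h e he h1 h9
    exact ⟨by simp [PySem.Set.empty], h e h1 h9⟩

-- ===== VERDICT (by name: the statement is the Claim_ definition above) =====
theorem fila_o_columna_valida_spec : Claim_equal_fila_o_columna_valida := by
  intro lista _
  unfold Spec_fila_o_columna_valida
  rw [Bool.eq_iff_iff, A_iff, B_iff]
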